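-- pv_equiv track=rewrite | github.com/nlpsoc/Tokenization-Language-Variation | src/styletokenizer/logistic_regression.py | word_cross_product
-- ===== SOURCE A (Python) =====
-- from collections import Counter
-- from itertools import product
-- from typing import List, Dict, Tuple
--
-- def word_cross_product(t1, t2, symmetric) -> Dict[Tuple[str, str], int]:
--     """Basis for cross-product features. This tends to produce pretty
--     dense representations.
--
--     Parameters
--     ----------
--     t1, t2 : list of str
--         Tokenized premise and hypothesis.
--
--     Returns
--     -------
--     Counter
--         Maps each (w1, w2) in the cross-product of `t1` and `t2` to its count.
--         :param symmetric:
--     """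
--     counters = Counter([(w1, w2) for w1, w2 in product(t1, t2)])
--
--     if symmetric:
--         result = Counter()
--         # combine the two counters (w1, w2) and (w2, w1) to one if w1 != w2
--         for (w1, w2), count in counters.items():
--             word_order = (w1, w2)
--             if w1 != w2 and w1 > w2:
--                 # decide order between w1 and w2
--                 word_order = (w2, w1)
--             if word_order in result:
--                 result[word_order] += count
--             else:
--                 result[word_order] = count
--         return result
--     else:
--         return counters
-- ===== SOURCE B (Python) =====
-- from collections import Counter
--
-- def word_cross_product(t1, t2, symmetric):
--     # Count each token list once, then multiply counts over distinct word pairs: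
--     # O(|t1| + |t2| + D1*D2) instead of A's O(|t1|*|t2|).
--     c1 = Counter(t1)
--     c2 = Counter(t2)
--     base = {(w1, w2): n1 * n2 for w1, n1 in c1.items() for w2, n2 in c2.items()}
--     if not symmetric:
--         return base
--     result = {}
--     for (w1, w2), count in base.items():
--         key = (w1, w2) if w1 <= w2 else (w2, w1)
--         result[key] = result.get(key, 0) + count
--     return result
-- ===== Notes on version B (the rewrite author's own statement) =====
-- stated objective: faster
-- what changed: Instead of materializing and counting the full |t1|*|t2| cross-product list, B counts token frequencies of each list once and multiplies counts over the distinct word pairs.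
import Mathlib
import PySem

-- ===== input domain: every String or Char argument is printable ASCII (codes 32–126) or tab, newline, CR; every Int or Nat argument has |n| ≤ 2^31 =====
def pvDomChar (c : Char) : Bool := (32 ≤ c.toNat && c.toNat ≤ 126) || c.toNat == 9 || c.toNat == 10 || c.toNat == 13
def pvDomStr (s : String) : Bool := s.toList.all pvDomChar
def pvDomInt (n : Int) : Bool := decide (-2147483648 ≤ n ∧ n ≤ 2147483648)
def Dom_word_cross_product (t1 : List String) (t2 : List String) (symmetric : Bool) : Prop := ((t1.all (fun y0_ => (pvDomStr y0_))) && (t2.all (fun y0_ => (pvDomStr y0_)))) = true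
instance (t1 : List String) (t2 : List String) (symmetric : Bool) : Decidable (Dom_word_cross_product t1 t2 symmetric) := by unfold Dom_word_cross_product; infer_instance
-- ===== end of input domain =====

-- B counts each token list once and multiplies counts over distinct word pairs instead of
-- materializing and counting the full cross-product list (objective: faster, asymptotically).


-- ===== PORT A =====
def word_cross_product (t1 : List String) (t2 : List String) (symmetric : Bool) : List (String × String × Int) :=
  -- counters = Counter([(w1, w2) for w1, w2 in product(t1, t2)])
  let counters : PySem.Dict (String × String) Int :=
    PySem.Dict.counter (t1.flatMap (fun w1 => t2.map (fun w2 => (w1, w2))))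
  let res : PySem.Dict (String × String) Int :=
    if symmetric then
      -- for (w1, w2), count in counters.items(): …
      counters.items.foldl (fun result p =>
        let word_order := if p.1.1 ≠ p.1.2 ∧ p.1.2 < p.1.1 then (p.1.2, p.1.1) else (p.1.1, p.1.2)
        if result.contains word_order then result.modify word_order 0 (· + p.2)
        else result.insert word_order p.2) PySem.Dict.empty
    else counters
  -- dict with tuple keys rendered as the flat association list the signature asks for
  res.items.map (fun p => (p.1.1, p.1.2, p.2))

-- ===== PORT B =====
def word_cross_product_alt (t1 : List String) (t2 : List String) (symmetric : Bool) : List (String × String × Int) :=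
  let c1 := PySem.Dict.counter t1
  let c2 := PySem.Dict.counter t2
  -- base = {(w1, w2): n1 * n2 for w1, n1 in c1.items() for w2, n2 in c2.items()}
  let base : PySem.Dict (String × String) Int :=
    PySem.Dict.ofList (c1.items.flatMap (fun p1 => c2.items.map (fun p2 => ((p1.1, p2.1), p1.2 * p2.2))))
  if !symmetric then base.items.map (fun p => (p.1.1, p.1.2, p.2))
  else
    -- result[key] = result.get(key, 0) + count
    (base.items.foldl (fun result p =>
        let key := if p.1.1 ≤ p.1.2 then p.1 else (p.1.2, p.1.1)
        result.modify key 0 (· + p.2)) PySem.Dict.empty).items.map (fun p => (p.1.1, p.1.2, p.2))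

-- ===== PRECONDITION & SPEC =====
def Spec_word_cross_product (t1 : List String) (t2 : List String) (symmetric : Bool) (out : List (String × String × Int)) : Prop := out = word_cross_product_alt t1 t2 symmetric
instance (t1 : List String) (t2 : List String) (symmetric : Bool) (out : List (String × String × Int)) : Decidable (Spec_word_cross_product t1 t2 symmetric out) := by unfold Spec_word_cross_product; infer_instance

-- ===== CLAIM (what is proved, stated in full; the proofs are below) =====
def Claim_equal_word_cross_product : Prop := ∀ (t1 : List String) (t2 : List String) (symmetric : Bool), Dom_word_cross_product t1 t2 symmetric → Spec_word_cross_product t1 t2 symmetric (word_cross_product t1 t2 symmetric)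

-- ===== LEMMAS AND PROOFS =====

-- set(map f xs) = map f (set(xs)) for injective f
theorem pv_ofList_map_inj {α β : Type} [BEq α] [LawfulBEq α] [BEq β] [LawfulBEq β]
    (f : α → β) (hf : Function.Injective f) (xs : List α) :
    PySem.Set.ofList (xs.map f) = (PySem.Set.ofList xs).map f := by
  induction xs with
  | nil => rfl
  | cons x xs ih =>
      rw [List.map_cons, PySem.Set.ofList_cons, PySem.Set.ofList_cons, ih, List.map_cons]
      congr 1
      simp only [PySem.Set.discard, List.filter_map]
      rw [List.filter_congr (q := fun y => !y == x) (fun y _ => by simp [Function.comp, hf.eq_iff])]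

-- first-occurrence dedup of the cross-product list is the cross-product of the dedups
theorem pv_ofList_product (t1 t2 : List String) :
    PySem.Set.ofList (t1.flatMap (fun a => t2.map (fun b => (a, b)))) =
      (PySem.Set.ofList t1).flatMap (fun a => (PySem.Set.ofList t2).map (fun b => (a, b))) := by
  induction t1 with
  | nil => rfl
  | cons a t1 ih =>
      rw [List.flatMap_cons, PySem.Set.ofList_append, PySem.Set.update_eq_append_filter, ih,
        PySem.Set.ofList_cons, List.flatMap_cons]
      have hblk : PySem.Set.ofList (t2.map (fun b => (a, b))) =
          (PySem.Set.ofList t2).map (fun b => (a, b)) :=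
        pv_ofList_map_inj _ (fun x y h => by simpa using h) t2
      rw [hblk]
      congr 1
      rw [List.filter_flatMap]
      unfold PySem.Set.discard
      -- blockwise: a block for a_1 survives the filter iff a_1 ≠ a
      induction (PySem.Set.ofList t1) with
      | nil => rfl
      | cons c s ihs =>
          rw [List.flatMap_cons, List.filter_cons, ihs]
          by_cases hca : c = a
          · subst hca
            have hz : List.filter (fun y => !PySem.Set.contains
                (List.map (fun b => (c, b)) (PySem.Set.ofList t2)) y)
                (List.map (fun b => (c, b)) (PySem.Set.ofList t2)) = [] := by
              rw [List.filter_eq_nil_iff]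
              intro p hp
              simp only [PySem.Set.contains, Bool.not_eq_true', Bool.not_eq_false]
              exact List.elem_eq_true_of_mem hp
            rw [hz, if_neg (by simp)]
            rfl
          · have hw : List.filter (fun y => !PySem.Set.contains
                (List.map (fun b => (a, b)) (PySem.Set.ofList t2)) y)
                (List.map (fun b => (c, b)) (PySem.Set.ofList t2)) =
                List.map (fun b => (c, b)) (PySem.Set.ofList t2) := by
              rw [List.filter_eq_self]
              intro p hp
              obtain ⟨b, hb, rfl⟩ := List.mem_map.mp hp
              simp only [PySem.Set.contains, Bool.not_eq_true', List.contains_eq_mem, decide_eq_false_iff_not, List.mem_map]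
              rintro ⟨b', -, hb'⟩
              exact hca (congrArg Prod.fst hb').symm
            rw [hw, if_pos (by simp [hca]), List.flatMap_cons]

-- count of a pair in the cross-product list is the product of the counts
theorem pv_count_product (t1 t2 : List String) (x y : String) :
    (t1.flatMap (fun a => t2.map (fun b => (a, b)))).count (x, y) = t1.count x * t2.count y := by
  induction t1 with
  | nil => simp
  | cons a t1 ih =>
      rw [List.flatMap_cons, List.count_append, ih, List.count_cons]
      by_cases h : a = x
      · subst h
        have hc : (t2.map (fun b => (a, b))).count (a, y) = t2.count y :=
          List.count_map_of_injective _ _ (fun u v h => by simpa using h) _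
        simp [hc, Nat.succ_mul, Nat.add_comm]
      · have hc : (t2.map (fun b => (a, b))).count (x, y) = 0 := by
          simp [List.count_eq_zero, h]
        simp [hc, h]

-- both programs build the same base dict (as an items list)
theorem pv_base_items (t1 t2 : List String) :
    (PySem.Dict.counter (t1.flatMap (fun w1 => t2.map (fun w2 => (w1, w2))))).items =
      (PySem.Dict.ofList ((PySem.Dict.counter t1).items.flatMap
        (fun p1 => (PySem.Dict.counter t2).items.map
          (fun p2 => ((p1.1, p2.1), p1.2 * p2.2))))).items := by
  have hl : (PySem.Dict.counter t1).items.flatMap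
        (fun p1 => (PySem.Dict.counter t2).items.map (fun p2 => ((p1.1, p2.1), p1.2 * p2.2))) =
      (PySem.Set.ofList t1).flatMap (fun b => (PySem.Set.ofList t2).map
        (fun w => ((b, w), ((t1.count b : Int) * (t2.count w : Int))))) := by
    rw [PySem.Dict.items_counter, PySem.Dict.items_counter, List.flatMap_map]
    simp [List.map_map, Function.comp_def]
  have hkeys : (PySem.Dict.ofList ((PySem.Dict.counter t1).items.flatMap
        (fun p1 => (PySem.Dict.counter t2).items.map (fun p2 => ((p1.1, p2.1), p1.2 * p2.2))))).items =
      (PySem.Set.ofList t1).flatMap (fun b => (PySem.Set.ofList t2).map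
        (fun w => ((b, w), ((t1.count b : Int) * (t2.count w : Int))))) := by
    rw [hl]
    unfold PySem.Dict.ofList PySem.Dict.update
    rw [PySem.Dict.items_foldl_insert_fresh _ Prod.fst Prod.snd _ (fun p _ => rfl) ?_]
    · simp [PySem.Dict.empty]
    · have : List.map Prod.fst ((PySem.Set.ofList t1).flatMap (fun b => (PySem.Set.ofList t2).map
          (fun w => ((b, w), ((t1.count b : Int) * (t2.count w : Int)))))) =
          (PySem.Set.ofList t1).flatMap (fun b => (PySem.Set.ofList t2).map (fun w => (b, w))) := by
        simp [List.map_flatMap, List.map_map, Function.comp_def]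
      rw [this, ← pv_ofList_product]
      exact PySem.Set.nodup_ofList _
  rw [hkeys, PySem.Dict.items_counter, pv_ofList_product]
  rw [List.map_flatMap]
  congr 1
  funext b
  rw [List.map_map]
  congr 1
  funext w
  simp [pv_count_product]

theorem word_cross_product_spec : Claim_equal_word_cross_product := by
  intro t1 t2 symmetric _
  unfold Spec_word_cross_product word_cross_product word_cross_product_alt
  cases symmetric with
  | false =>
      simp only [Bool.false_eq_true, Bool.not_false, if_true, if_false]
      rw [pv_base_items]
  | true =>
      simp only [Bool.not_true, Bool.false_eq_true, if_true, if_false]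
      rw [pv_base_items]
      refine congrArg (List.map _) (congrArg PySem.Dict.items ?_)
      refine PySem.List.foldl_congr_mem _ _ _ _ (fun acc p _ => ?_)
      have hkey : (if p.1.1 ≠ p.1.2 ∧ p.1.2 < p.1.1 then (p.1.2, p.1.1) else (p.1.1, p.1.2)) =
          (if p.1.1 ≤ p.1.2 then p.1 else (p.1.2, p.1.1)) := by
        by_cases h : p.1.1 ≤ p.1.2
        · rw [if_pos h, if_neg (by rintro ⟨-, hlt⟩; exact absurd h (Std.not_le.mpr hlt))]
        · have hlt : p.1.2 < p.1.1 := Std.not_le.mp h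
          rw [if_neg h, if_pos ⟨fun he => h (le_of_eq he), hlt⟩]
      show (if acc.contains (if p.1.1 ≠ p.1.2 ∧ p.1.2 < p.1.1 then (p.1.2, p.1.1) else (p.1.1, p.1.2))
            then acc.modify (if p.1.1 ≠ p.1.2 ∧ p.1.2 < p.1.1 then (p.1.2, p.1.1) else (p.1.1, p.1.2)) 0 (· + p.2)
            else acc.insert (if p.1.1 ≠ p.1.2 ∧ p.1.2 < p.1.1 then (p.1.2, p.1.1) else (p.1.1, p.1.2)) p.2) =
          acc.modify (if p.1.1 ≤ p.1.2 then p.1 else (p.1.2, p.1.1)) 0 (· + p.2)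
      rw [hkey]
      by_cases hc : acc.contains (if p.1.1 ≤ p.1.2 then p.1 else (p.1.2, p.1.1))
      · rw [if_pos hc]
      · rw [if_neg hc]
        unfold PySem.Dict.modify
        rw [PySem.Dict.getD_of_not_contains _ _ (Bool.eq_false_iff.mpr hc)]
        show acc.insert (if p.1.1 ≤ p.1.2 then p.1 else (p.1.2, p.1.1)) p.2 =
          acc.insert (if p.1.1 ≤ p.1.2 then p.1 else (p.1.2, p.1.1)) (0 + p.2)
        rw [zero_add]
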